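-- pv_equiv track=rewrite | github.com/kylebebak/py-geohash-any | py_geohash_any/urlsafe.py | to_urlsafe
-- ===== SOURCE A (Python) =====
-- import string
--
-- ALPHABET = string.ascii_uppercase + string.ascii_lowercase + \
--     string.digits + '-_'
--
-- BASE = len(ALPHABET)
--
-- SIGN_CHARACTER = '$'
--
-- def to_urlsafe(n):
--     """Converts integer to url-safe string."""
--     if n < 0:
--         return SIGN_CHARACTER + to_urlsafe(-n)
--     s = []
--     while True:
--         n, r = divmod(n, BASE)
--         s.append(ALPHABET[r])
--         if n == 0:
--             break
--     return ''.join(reversed(s))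
-- ===== SOURCE B (Python) =====
-- import string
--
-- ALPHABET = string.ascii_uppercase + string.ascii_lowercase + \
--     string.digits + '-_'
--
-- BASE = len(ALPHABET)
--
-- SIGN_CHARACTER = '$'
--
-- def to_urlsafe(n):
--     """Converts integer to url-safe string (recursive, most-significant digit first)."""
--     if n < 0:
--         return SIGN_CHARACTER + to_urlsafe(-n)
--     if n < BASE:
--         return ALPHABET[n]
--     return to_urlsafe(n // BASE) + ALPHABET[n % BASE]
-- ===== Notes on version B (the rewrite author's own statement) =====
-- stated objective: simpler
-- what changed: Replaces the mutable digit list + while-loop + explicit reversal with direct recursion on the quotient that emits the most-significant digit first, so no accumulator or reversal is needed.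
import Mathlib
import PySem

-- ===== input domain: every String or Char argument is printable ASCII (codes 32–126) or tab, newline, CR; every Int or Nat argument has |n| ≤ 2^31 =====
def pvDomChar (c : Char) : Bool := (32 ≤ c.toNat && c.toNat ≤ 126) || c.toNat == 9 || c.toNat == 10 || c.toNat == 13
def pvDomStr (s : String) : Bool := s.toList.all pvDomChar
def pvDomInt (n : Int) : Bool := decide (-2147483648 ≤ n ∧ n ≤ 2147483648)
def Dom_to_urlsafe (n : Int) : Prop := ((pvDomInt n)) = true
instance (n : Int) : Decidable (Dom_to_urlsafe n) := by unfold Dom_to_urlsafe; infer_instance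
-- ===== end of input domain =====

-- B replaces A's while-loop + list accumulator + reversal with direct recursion on the
-- quotient emitting the most-significant digit first (objective: simpler).


-- ===== PORT A =====
-- ALPHABET = uppercase + lowercase + digits + '-_'
def pvAlphabet : List Char :=
  "ABCDEFGHIJKLMNOPQRSTUVWXYZabcdefghijklmnopqrstuvwxyz0123456789-_".toList

-- A's `while True` loop; entered only with n ≥ 0 (the sign branch fired already), so the
-- loop counter is carried as a Nat (Python // and % agree with Nat / and % there).
-- ALPHABET[r] has r = n % 64 always in range, so getD's default is never used.
def to_urlsafeLoop (n : Nat) (s : List Char) : List Char :=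
  let q := n / 64
  let r := n % 64
  let s' := s ++ [pvAlphabet.getD r 'A']
  if q = 0 then s' else to_urlsafeLoop q s'
termination_by n
decreasing_by exact Nat.div_lt_self (by omega) (by omega)

def to_urlsafe (n : Int) : String :=
  if n < 0 then "$" ++ to_urlsafe (-n)
  else String.mk (to_urlsafeLoop n.toNat []).reverse
termination_by (if n < 0 then 1 else 0)
decreasing_by rename_i h; simp only [if_pos h, if_neg (show ¬(-n < 0) by omega)]; omega

-- ===== PORT B =====
def to_urlsafe_alt (n : Int) : String :=
  if n < 0 then "$" ++ to_urlsafe_alt (-n)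
  else if n < 64 then String.mk [pvAlphabet.getD n.toNat 'A']
  else to_urlsafe_alt (PySem.Int.floordiv n 64) ++
       String.mk [pvAlphabet.getD (PySem.Int.mod n 64).toNat 'A']
termination_by (n.natAbs, if n < 0 then 1 else 0)
decreasing_by
  · rename_i h
    exact Prod.Lex.right' _ (by omega)
      (by simp only [if_pos h, if_neg (show ¬(-n < 0) by omega)]; omega)
  · apply Prod.Lex.left
    rw [PySem.Int.floordiv_eq_ediv_of_pos (by omega)]
    have h1 : 0 ≤ n / 64 := by omega
    have h2 : n / 64 < n := by omega
    omega

-- ===== PRECONDITION & SPEC =====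
def Spec_to_urlsafe (n : Int) (out : String) : Prop := out = to_urlsafe_alt n
instance (n : Int) (out : String) : Decidable (Spec_to_urlsafe n out) := by unfold Spec_to_urlsafe; infer_instance

-- ===== CLAIM (what is proved, stated in full; the proofs are below) =====
def Claim_equal_to_urlsafe : Prop := ∀ (n : Int), Dom_to_urlsafe n → Spec_to_urlsafe n (to_urlsafe n)

-- ===== LEMMAS AND PROOFS =====

theorem toList_mk (a : List Char) : (String.mk a).toList = a :=
  Eq.symm ((fun {l} {s} => String.ofList_eq.mp) rfl)

theorem mk_app (a b : List Char) : String.mk a ++ String.mk b = String.mk (a ++ b) := by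
  apply String.toList_inj.mp
  simp [toList_mk]

theorem loop_eq_alt (n : Nat) : ∀ (acc : List Char),
    String.mk (to_urlsafeLoop n acc).reverse
      = to_urlsafe_alt (n : Int) ++ String.mk acc.reverse := by
  induction n using Nat.strong_induction_on with
  | _ n ih =>
    intro acc
    have hnn : ¬ ((n : Int) < 0) := by omega
    rw [to_urlsafeLoop]
    by_cases hq : n / 64 = 0
    · have hn : n < 64 := by omega
      have hn' : (n : Int) < 64 := by omega
      have hmod : n % 64 = n := Nat.mod_eq_of_lt hn
      conv_rhs => rw [to_urlsafe_alt]
      rw [if_neg hnn, if_pos hn', mk_app]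
      simp [hq, hmod, List.reverse_append]
    · simp only [if_neg hq]
      rw [ih (n / 64) (Nat.div_lt_self (by omega) (by omega))]
      conv_rhs => rw [to_urlsafe_alt]
      have h64 : ¬ ((n : Int) < 64) := by omega
      have hfd : PySem.Int.floordiv (n : Int) 64 = ((n / 64 : Nat) : Int) := by
        exact_mod_cast PySem.Int.floordiv_natCast n 64
      have hmd : PySem.Int.mod (n : Int) 64 = ((n % 64 : Nat) : Int) := by
        exact_mod_cast PySem.Int.mod_natCast n 64
      rw [if_neg hnn, if_neg h64, hfd, hmd, String.append_assoc, mk_app]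
      have ht : (((n : Int)) % 64).toNat = n % 64 := by omega
      simp [ht, List.reverse_append]

theorem to_urlsafe_eq_alt_of_nonneg (n : Int) (h : 0 ≤ n) :
    to_urlsafe n = to_urlsafe_alt n := by
  rw [to_urlsafe, if_neg (by omega)]
  have := loop_eq_alt n.toNat []
  simp only [List.reverse_nil] at this
  rw [this, Int.toNat_of_nonneg h]
  have h0 : String.mk ([] : List Char) = "" := by decide
  rw [h0, String.append_empty]

-- ===== VERDICT (by name: the statement is the Claim_ definition above) =====
theorem to_urlsafe_spec : Claim_equal_to_urlsafe := by
  intro n _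
  show to_urlsafe n = to_urlsafe_alt n
  by_cases h : n < 0
  · rw [to_urlsafe, if_pos h, to_urlsafe_alt, if_pos h,
        to_urlsafe_eq_alt_of_nonneg (-n) (by omega)]
  · exact to_urlsafe_eq_alt_of_nonneg n (by omega)
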